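-- pv_equiv track=rewrite | github.com/Chris97924/parallax-kernel | parallax/injector.py | _trim_to_cap
-- ===== SOURCE A (Python) =====
-- _TRUNCATED_SUFFIX = "... (truncated)"
--
-- def _trim_to_cap(lines: list[str], cap: int) -> str:
--     # Defensive copy — this function must not mutate the caller's list.
--     local = list(lines)
--     out = "\n".join(local)
--     if len(out) <= cap:
--         return out
--     # Drop trailing lines (oldest entries land last in each section rendering)
--     # until the block + truncation marker fits the cap.
--     marker_budget = len(_TRUNCATED_SUFFIX) + 1  # +1 for the joining newline
--     while len(local) > 1 and len(out) + marker_budget > cap: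
--         local.pop()
--         out = "\n".join(local)
--     # If even the first line + marker doesn't fit, hard-slice the line
--     # itself rather than emitting a mid-marker truncation.
--     if len(out) + marker_budget > cap:
--         out = out[: max(cap - marker_budget, 0)]
--     return f"{out}\n{_TRUNCATED_SUFFIX}"
-- ===== SOURCE B (Python) =====
-- _TRUNCATED_SUFFIX = "... (truncated)"
--
-- def _trim_to_cap(lines: list[str], cap: int) -> str:
--     full = "\n".join(lines)
--     if len(full) <= cap:
--         return full
--     budget = cap - (len(_TRUNCATED_SUFFIX) + 1)  # room left for "\n... (truncated)"
--     # One pass over the line lengths: keep the longest prefix of lines (but at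
--     # least the first) whose joined length fits in the budget.  `total` is the
--     # joined length of the first `k` lines (−1 for the leading "no lines" state,
--     # so adding a line always costs len(line)+1 for its joining newline).
--     total = -1
--     k = 0
--     for ln in lines:
--         if k >= 1 and total + 1 + len(ln) > budget:
--             break
--         total += 1 + len(ln)
--         k += 1
--     head = "\n".join(lines[:k])
--     if len(head) > budget:
--         head = head[: max(budget, 0)]
--     return f"{head}\n{_TRUNCATED_SUFFIX}"
-- ===== Notes on version B (the rewrite author's own statement) =====
-- stated objective: faster
-- what changed: Replaces A's pop-and-rejoin loop (which re-joins the whole remaining list after every dropped line) with a single forward pass over line lengths that finds the longest fitting prefix, followed by one join and at most one slice.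
import Mathlib
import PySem

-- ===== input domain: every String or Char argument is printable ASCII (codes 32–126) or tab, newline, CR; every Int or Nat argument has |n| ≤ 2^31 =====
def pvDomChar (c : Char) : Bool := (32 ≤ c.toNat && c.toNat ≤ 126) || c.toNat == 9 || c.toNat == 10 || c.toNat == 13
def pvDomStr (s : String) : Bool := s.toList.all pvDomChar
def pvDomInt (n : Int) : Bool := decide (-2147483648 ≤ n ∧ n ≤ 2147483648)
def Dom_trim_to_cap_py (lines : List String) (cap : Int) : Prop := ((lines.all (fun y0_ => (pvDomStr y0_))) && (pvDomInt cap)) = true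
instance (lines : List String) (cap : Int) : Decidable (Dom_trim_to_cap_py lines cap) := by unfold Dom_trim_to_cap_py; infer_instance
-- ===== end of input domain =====

-- B replaces A's quadratic pop-and-rejoin loop with one forward pass over line lengths plus a single join; return values agree on all inputs (neither version mutates its argument).

def pvTruncSuffix : String := "... (truncated)"

-- ===== PORT A =====
-- A's while-loop: pop trailing lines while more than one remains and the joined block + marker exceeds cap
def trimALoop (cap mb : Int) (locl : List String) : List String :=
  if _h : 1 < locl.length ∧ PySem.Str.len (PySem.Str.join "\n" locl) + mb > cap then
    trimALoop cap mb locl.dropLast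
  else locl
termination_by locl.length
decreasing_by simp only [List.length_dropLast]; omega

def trim_to_cap_py (lines : List String) (cap : Int) : String :=
  let locl := lines
  let out := PySem.Str.join "\n" locl
  if PySem.Str.len out ≤ cap then out
  else
    let mb := PySem.Str.len pvTruncSuffix + 1
    let locl2 := trimALoop cap mb locl
    let out2 := PySem.Str.join "\n" locl2
    let out3 := if PySem.Str.len out2 + mb > cap
                then PySem.Str.slice out2 none (some (max (cap - mb) 0))
                else out2
    out3 ++ "\n" ++ pvTruncSuffix

-- ===== PORT B =====
-- Source B's for-loop: count how many leading lines (at least one) fit within the budget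
def trimBCount (budget : Int) : List String → Int → Nat → Nat
  | [], _, k => k
  | ln :: rest, total, k =>
    if 1 ≤ k ∧ total + 1 + PySem.Str.len ln > budget then k
    else trimBCount budget rest (total + 1 + PySem.Str.len ln) (k + 1)

def trim_to_cap_py_alt (lines : List String) (cap : Int) : String :=
  let full := PySem.Str.join "\n" lines
  if PySem.Str.len full ≤ cap then full
  else
    let budget := cap - (PySem.Str.len pvTruncSuffix + 1)
    let k := trimBCount budget lines (-1) 0
    let head := PySem.Str.join "\n" (PySem.List.slice lines none (some (k : Int)))
    let head2 := if PySem.Str.len head > budget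
                 then PySem.Str.slice head none (some (max budget 0))
                 else head
    head2 ++ "\n" ++ pvTruncSuffix

-- ===== PRECONDITION & SPEC =====
def Spec_trim_to_cap_py (lines : List String) (cap : Int) (out : String) : Prop := out = trim_to_cap_py_alt lines cap
instance (lines : List String) (cap : Int) (out : String) : Decidable (Spec_trim_to_cap_py lines cap out) := by unfold Spec_trim_to_cap_py; infer_instance

-- ===== CLAIM (what is proved, stated in full; the proofs are below) =====
def Claim_equal_trim_to_cap_py : Prop := ∀ (lines : List String) (cap : Int), Dom_trim_to_cap_py lines cap → Spec_trim_to_cap_py lines cap (trim_to_cap_py lines cap)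

-- ===== LEMMAS AND PROOFS =====

-- length (as a Nat) of "\n".join(l)
def NJ (l : List String) : Nat := (PySem.Chars.join ['\n'] (l.map String.toList)).length

-- "the first k lines, joined, fit within the budget"
abbrev Fit (l : List String) (budget : Int) (k : Nat) : Prop := (NJ (l.take k) : Int) ≤ budget

theorem NJ_cons_cons (x y : String) (r : List String) :
    NJ (x :: y :: r) = x.toList.length + 1 + NJ (y :: r) := by
  simp [NJ, PySem.Chars.join_cons_cons]; omega

theorem NJ_formula (l : List String) (h : l ≠ []) :
    NJ l + 1 = (l.map (fun s => s.toList.length)).sum + l.length := by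
  induction l with
  | nil => simp at h
  | cons x rest ih =>
    cases rest with
    | nil => simp [NJ, PySem.Chars.join_singleton]
    | cons y r =>
      have h2 := ih (by simp)
      rw [NJ_cons_cons]
      simp only [List.map_cons, List.sum_cons, List.length_cons] at *
      omega

theorem sum_take_le (xs : List Nat) (j : Nat) : (xs.take j).sum ≤ xs.sum := by
  conv_rhs => rw [← List.take_append_drop j xs]
  rw [List.sum_append]
  exact Nat.le_add_right _ _

theorem sum_take_mono (xs : List Nat) {j k : Nat} (h : j ≤ k) :
    (xs.take j).sum ≤ (xs.take k).sum := by
  have h1 : (xs.take k).take j = xs.take j := by rw [List.take_take, Nat.min_eq_left h]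
  rw [← h1]
  exact sum_take_le _ _

theorem NJ_take_mono (l : List String) {j k : Nat} (h : j ≤ k) :
    NJ (l.take j) ≤ NJ (l.take k) := by
  by_cases hj : l.take j = []
  · simp [hj, NJ, PySem.Chars.join_nil]
  · have hk : l.take k ≠ [] := by
      intro hk; apply hj
      have h1 : (l.take k).take j = l.take j := by rw [List.take_take, Nat.min_eq_left h]
      rw [← h1, hk]; simp
    have f1 := NJ_formula _ hj
    have f2 := NJ_formula _ hk
    have hs : ((l.take j).map (fun s => s.toList.length)).sum ≤ ((l.take k).map (fun s => s.toList.length)).sum := by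
      rw [List.map_take, List.map_take]
      exact sum_take_mono _ h
    have hl : (l.take j).length ≤ (l.take k).length := by
      simp [List.length_take]; omega
    omega

theorem NJ_take_succ (l : List String) (k : Nat) (hk : 1 ≤ k) (hlt : k < l.length) :
    NJ (l.take (k + 1)) = NJ (l.take k) + 1 + (l[k]'hlt).toList.length := by
  have ht : l.take (k+1) = l.take k ++ [l[k]'hlt] := by
    rw [List.take_add_one]; simp [List.getElem?_eq_getElem hlt]
  have h1 : l.take k ≠ [] := by
    intro hc
    have hlen : (l.take k).length = min k l.length := by simp
    rw [hc] at hlen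
    simp at hlen
    omega
  have h2 : l.take (k+1) ≠ [] := by
    intro hc; rw [ht] at hc; exact List.cons_ne_nil _ _ (List.nil_eq_append_iff.mp hc.symm).2
  have f1 := NJ_formula _ h1
  have f2 := NJ_formula _ h2
  rw [ht] at f2
  rw [ht]
  simp only [List.map_append, List.sum_append, List.length_append, List.map_cons, List.sum_cons, List.map_nil, List.sum_nil, List.length_cons, List.length_nil] at f2
  omega

theorem lenJoin (l : List String) : PySem.Str.len (PySem.Str.join "\n" l) = (NJ l : Int) := by
  simp [PySem.Str.len_eq, PySem.Str.toList_join, NJ]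

theorem Fit_mono (l : List String) (budget : Int) {j k : Nat} (h : j ≤ k)
    (hf : Fit l budget k) : Fit l budget j := by
  unfold Fit at *
  have := NJ_take_mono l h
  omega

theorem fG_spec_or (P : Nat → Prop) [DecidablePred P] (n : Nat) :
    Nat.findGreatest P n = 0 ∨ P (Nat.findGreatest P n) := by
  induction n with
  | zero => left; rfl
  | succ m ih =>
    rw [Nat.findGreatest_succ]
    split_ifs with h
    · right; exact h
    · exact ih

theorem dropLast_take (l : List String) (n : Nat) (h : n ≤ l.length) :
    (l.take n).dropLast = l.take (n - 1) := by
  rw [List.dropLast_eq_take, List.take_take, List.length_take]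
  congr 1
  omega

theorem trimALoop_eq (l : List String) (cap mb : Int) :
    ∀ n, 1 ≤ n → n ≤ l.length →
      trimALoop cap mb (l.take n) = l.take (max (Nat.findGreatest (Fit l (cap - mb)) n) 1) := by
  intro n
  induction n with
  | zero => omega
  | succ m ih =>
    intro _ hle
    rw [trimALoop]
    have hlen : (l.take (m+1)).length = m + 1 := by
      rw [List.length_take]; omega
    have hfit : PySem.Str.len (PySem.Str.join "\n" (l.take (m+1))) + mb > cap ↔ ¬ Fit l (cap - mb) (m+1) := by
      rw [lenJoin]; unfold Fit; omega
    by_cases hm : m = 0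
    · subst hm
      simp only [Nat.zero_add] at hlen hfit ⊢
      have : ¬ (1 < (l.take 1).length ∧ PySem.Str.len (PySem.Str.join "\n" (l.take 1)) + mb > cap) := by
        rw [hlen]; omega
      rw [dif_neg this]
      have h1 : Nat.findGreatest (Fit l (cap - mb)) 1 ≤ 1 := Nat.findGreatest_le _
      congr 1
      omega
    · by_cases hf : Fit l (cap - mb) (m+1)
      · have : ¬ (1 < (l.take (m+1)).length ∧ PySem.Str.len (PySem.Str.join "\n" (l.take (m+1))) + mb > cap) := by
          rw [hfit]; tauto
        rw [dif_neg this]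
        have h1 : Nat.findGreatest (Fit l (cap - mb)) (m+1) = m + 1 := by
          have := Nat.le_findGreatest (le_refl (m+1)) hf
          have := Nat.findGreatest_le (P := Fit l (cap - mb)) (m+1)
          omega
        rw [h1]
        congr 1
        omega
      · have hcond : (1 < (l.take (m+1)).length ∧ PySem.Str.len (PySem.Str.join "\n" (l.take (m+1))) + mb > cap) := by
          rw [hlen, hfit]; exact ⟨by omega, hf⟩
        rw [dif_pos hcond, dropLast_take l (m+1) hle]
        have h2 : Nat.findGreatest (Fit l (cap - mb)) (m+1) = Nat.findGreatest (Fit l (cap - mb)) m := by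
          rw [Nat.findGreatest_succ, if_neg hf]
        simp only [Nat.add_sub_cancel]
        rw [h2]
        exact ih (by omega) (by omega)

theorem K_break (l : List String) (budget : Int) (k : Nat) (hk1 : 1 ≤ k)
    (hor : k = 1 ∨ Fit l budget k) (hkle : k ≤ l.length) (hnf : ¬ Fit l budget (k+1)) :
    max (Nat.findGreatest (Fit l budget) l.length) 1 = k := by
  have hg_le : Nat.findGreatest (Fit l budget) l.length ≤ k := by
    rcases fG_spec_or (Fit l budget) l.length with h0 | hP
    · omega
    · by_contra hc
      rw [not_le] at hc
      exact hnf (Fit_mono l budget (by omega) hP)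
  rcases hor with h1 | hf
  · omega
  · have := Nat.le_findGreatest hkle hf
    omega

theorem NJ_one (x : String) (rest : List String) : NJ ((x :: rest).take 1) = x.toList.length := by
  simp [NJ, PySem.Chars.join_singleton]

theorem cond_iff (l : List String) (budget : Int) (k : Nat) (hk : 1 ≤ k) (hlt : k < l.length) :
    ((NJ (l.take k) : Int) + 1 + PySem.Str.len (l[k]'hlt) > budget) ↔ ¬ Fit l budget (k+1) := by
  rw [PySem.Str.len_eq]
  unfold Fit
  rw [NJ_take_succ l k hk hlt]
  push_cast
  omega

theorem trimBCount_eq (l : List String) (budget : Int) :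
    ∀ d k, d = l.length - k → 1 ≤ k → k ≤ l.length → (k = 1 ∨ Fit l budget k) →
      trimBCount budget (l.drop k) (NJ (l.take k) : Int) k
        = max (Nat.findGreatest (Fit l budget) l.length) 1 := by
  intro d
  induction d with
  | zero =>
    intro k hd hk1 hkle hor
    have hk : k = l.length := by omega
    subst hk
    rw [List.drop_length]
    show l.length = _
    have hle := Nat.findGreatest_le (P := Fit l budget) l.length
    rcases hor with h1 | hf
    · omega
    · have := Nat.le_findGreatest (le_refl l.length) hf
      omega
  | succ m ih =>
    intro k hd hk1 hkle hor
    have hlt : k < l.length := by omega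
    rw [List.drop_eq_getElem_cons hlt]
    show (if 1 ≤ k ∧ (NJ (l.take k) : Int) + 1 + PySem.Str.len (l[k]'hlt) > budget then k
          else trimBCount budget (l.drop (k+1)) ((NJ (l.take k) : Int) + 1 + PySem.Str.len (l[k]'hlt)) (k+1)) = _
    by_cases hc : (NJ (l.take k) : Int) + 1 + PySem.Str.len (l[k]'hlt) > budget
    · rw [if_pos ⟨hk1, hc⟩]
      exact (K_break l budget k hk1 hor hkle ((cond_iff l budget k hk1 hlt).mp hc)).symm
    · rw [if_neg (by tauto)]
      have hfit : Fit l budget (k+1) := by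
        by_contra hn
        exact hc ((cond_iff l budget k hk1 hlt).mpr hn)
      have htot : (NJ (l.take k) : Int) + 1 + PySem.Str.len (l[k]'hlt) = (NJ (l.take (k+1)) : Int) := by
        rw [PySem.Str.len_eq, NJ_take_succ l k hk1 hlt]
        push_cast
        ring
      rw [htot]
      exact ih (k+1) (by omega) (by omega) (by omega) (Or.inr hfit)

theorem trimBCount_start (x : String) (rest : List String) (budget : Int) :
    trimBCount budget (x :: rest) (-1) 0
      = max (Nat.findGreatest (Fit (x :: rest) budget) (x :: rest).length) 1 := by
  show (if 1 ≤ 0 ∧ (-1 : Int) + 1 + PySem.Str.len x > budget then 0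
        else trimBCount budget rest ((-1 : Int) + 1 + PySem.Str.len x) 1) = _
  rw [if_neg (by omega)]
  have h1 : ((-1 : Int) + 1 + PySem.Str.len x) = (NJ ((x :: rest).take 1) : Int) := by
    rw [NJ_one, PySem.Str.len_eq]; ring
  have h2 : rest = (x :: rest).drop 1 := rfl
  rw [h1, h2]
  exact trimBCount_eq (x :: rest) budget ((x :: rest).length - 1) 1 rfl (by omega) (by simp) (Or.inl rfl)

theorem main_eq (lines : List String) (cap : Int) :
    trim_to_cap_py lines cap = trim_to_cap_py_alt lines cap := by
  have key : trimALoop cap (PySem.Str.len pvTruncSuffix + 1) lines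
      = PySem.List.slice lines none
          (some ((trimBCount (cap - (PySem.Str.len pvTruncSuffix + 1)) lines (-1) 0 : Nat) : Int)) := by
    cases lines with
    | nil =>
      rw [trimALoop, dif_neg (by simp)]
      rw [PySem.List.slice_to_natCast]
      rfl
    | cons x rest =>
      rw [PySem.List.slice_to_natCast, trimBCount_start]
      have ht : (x :: rest) = (x :: rest).take (x :: rest).length := (List.take_length).symm
      conv_lhs => rw [ht]
      exact trimALoop_eq (x :: rest) cap (PySem.Str.len pvTruncSuffix + 1) (x :: rest).length
        (by simp) (le_refl _)
  rw [trim_to_cap_py, trim_to_cap_py_alt]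
  dsimp only
  rw [key]
  by_cases h : PySem.Str.len (PySem.Str.join "\n" lines) ≤ cap
  · rw [if_pos h, if_pos h]
  · rw [if_neg h, if_neg h]
    exact congrArg (fun z => z ++ "\n" ++ pvTruncSuffix) (if_congr (by omega) rfl rfl)

-- ===== VERDICT (by name: the statement is the Claim_ definition above) =====
theorem trim_to_cap_py_spec : Claim_equal_trim_to_cap_py := by
  intro lines cap _
  unfold Spec_trim_to_cap_py
  exact main_eq lines cap
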